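-- pv_equiv track=rewrite | github.com/Wajihashoaib/Python-Course | Self Driving Function.py | SelfDriving_MonitoringSensor
-- ===== SOURCE A (Python) =====
-- def SelfDriving_MonitoringSensor(distanceRange,detectObjectIndex,position):
--     result = [0,1]
--     temp = result.copy()                         #storing value of result in temp
--     for index in range(2,distanceRange):
--         temp += [temp[index-1] + temp[index-2]]  # Generating Fibonacci sequence
--         if index >= detectObjectIndex and position == 'start':
--             result += [temp[index]+1]
--         elif index >= detectObjectIndex and position == 'end':
--             result += [temp[index]-1]
--         else:
--             result += [temp[index]]
--     return result
-- ===== SOURCE B (Python) =====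
-- def SelfDriving_MonitoringSensor(distanceRange, detectObjectIndex, position):
--     # Pass 1: build the plain Fibonacci list.
--     fib = [0, 1]
--     for _ in range(2, distanceRange):
--         fib.append(fib[-1] + fib[-2])
--     # Hoisted, computed once instead of per iteration.
--     offset = 1 if position == 'start' else (-1 if position == 'end' else 0)
--     # Pass 2: apply the offset to the generated entries at or after the index.
--     return [v + offset if i >= 2 and i >= detectObjectIndex else v
--             for i, v in enumerate(fib)]
-- ===== Notes on version B (the rewrite author's own statement) =====
-- stated objective: alternative
-- what changed: Replaces A's single lockstep loop (which re-tests position every iteration and grows two lists side by side) with two separately shaped passes: build the plain Fibonacci list, hoist the position test into a single offset computed once, then apply the offset in a second enumerate pass.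
import Mathlib
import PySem

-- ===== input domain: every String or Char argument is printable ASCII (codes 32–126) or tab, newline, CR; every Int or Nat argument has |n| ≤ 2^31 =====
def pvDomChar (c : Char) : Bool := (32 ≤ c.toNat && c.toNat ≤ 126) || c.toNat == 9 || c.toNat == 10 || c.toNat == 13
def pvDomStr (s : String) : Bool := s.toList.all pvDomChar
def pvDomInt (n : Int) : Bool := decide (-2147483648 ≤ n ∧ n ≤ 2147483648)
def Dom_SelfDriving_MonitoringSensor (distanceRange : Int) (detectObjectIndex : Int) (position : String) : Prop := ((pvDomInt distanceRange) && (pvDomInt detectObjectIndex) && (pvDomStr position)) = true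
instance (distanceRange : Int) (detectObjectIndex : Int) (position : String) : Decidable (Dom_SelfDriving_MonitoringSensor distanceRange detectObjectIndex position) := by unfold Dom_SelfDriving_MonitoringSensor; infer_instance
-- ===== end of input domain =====

-- B restructures A's single lockstep loop into two passes: build the Fibonacci
-- list, compute the position offset once, then adjust in a second pass (alternative decomposition).

-- ===== PORT A =====
-- loop body of A; pyGetD with default 0 is exact here: every index A uses is in range
def pvStepA (detectObjectIndex : Int) (position : String)
    (st : List Int × List Int) (index : Int) : List Int × List Int :=
  let temp := st.2 ++ [PySem.List.pyGetD st.2 (index - 1) 0 + PySem.List.pyGetD st.2 (index - 2) 0]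
  let result :=
    if index ≥ detectObjectIndex ∧ position = "start" then
      st.1 ++ [PySem.List.pyGetD temp index 0 + 1]
    else if index ≥ detectObjectIndex ∧ position = "end" then
      st.1 ++ [PySem.List.pyGetD temp index 0 - 1]
    else
      st.1 ++ [PySem.List.pyGetD temp index 0]
  (result, temp)

def SelfDriving_MonitoringSensor (distanceRange : Int) (detectObjectIndex : Int) (position : String) : List Int :=
  ((PySem.List.pyRange 2 distanceRange 1).foldl (pvStepA detectObjectIndex position) ([0, 1], [0, 1])).1

-- ===== PORT B =====
-- fib.append(fib[-1] + fib[-2]); indices -1/-2 always in range, so pyGetD _ 0 is exact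
def pvStepB (f : List Int) (_ : Int) : List Int :=
  f ++ [PySem.List.pyGetD f (-1) 0 + PySem.List.pyGetD f (-2) 0]

def SelfDriving_MonitoringSensor_alt (distanceRange : Int) (detectObjectIndex : Int) (position : String) : List Int :=
  let fib := (PySem.List.pyRange 2 distanceRange 1).foldl pvStepB [0, 1]
  let offset : Int := if position = "start" then 1 else if position = "end" then -1 else 0
  (PySem.List.enumerate fib 0).map
    (fun p => if 2 ≤ p.1 ∧ detectObjectIndex ≤ p.1 then p.2 + offset else p.2)

-- ===== PRECONDITION & SPEC =====
def Spec_SelfDriving_MonitoringSensor (distanceRange : Int) (detectObjectIndex : Int) (position : String) (out : List Int) : Prop := out = SelfDriving_MonitoringSensor_alt distanceRange detectObjectIndex position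
instance (distanceRange : Int) (detectObjectIndex : Int) (position : String) (out : List Int) : Decidable (Spec_SelfDriving_MonitoringSensor distanceRange detectObjectIndex position out) := by unfold Spec_SelfDriving_MonitoringSensor; infer_instance

-- ===== CLAIM (what is proved, stated in full; the proofs are below) =====
def Claim_equal_SelfDriving_MonitoringSensor : Prop := ∀ (distanceRange : Int) (detectObjectIndex : Int) (position : String), Dom_SelfDriving_MonitoringSensor distanceRange detectObjectIndex position → Spec_SelfDriving_MonitoringSensor distanceRange detectObjectIndex position (SelfDriving_MonitoringSensor distanceRange detectObjectIndex position)

-- ===== LEMMAS AND PROOFS =====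

-- B's second pass, as a function of the list (proof helper)
def pvAdjust (detectObjectIndex : Int) (offset : Int) (xs : List Int) : List Int :=
  (PySem.List.enumerate xs 0).map
    (fun p => if 2 ≤ p.1 ∧ detectObjectIndex ≤ p.1 then p.2 + offset else p.2)

theorem pvAdjust_append (d off : Int) (xs : List Int) (y : Int) :
    pvAdjust d off (xs ++ [y]) =
      pvAdjust d off xs ++ [if 2 ≤ (xs.length : Int) ∧ d ≤ (xs.length : Int) then y + off else y] := by
  simp [pvAdjust, PySem.List.enumerate_append, PySem.List.enumerate_cons]

-- main loop invariant: after processing range(2, 2+k), A's temp equals B's fib,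
-- its length is k+2, and A's result is B's adjusted list of it
theorem pv_invariant (d : Int) (pos : String) (off : Int)
    (hoff : off = if pos = "start" then 1 else if pos = "end" then -1 else 0) (k : Nat) :
    ((PySem.List.pyRange 2 (2 + (k : Int)) 1).foldl (pvStepA d pos) ([0, 1], [0, 1])).2
        = (PySem.List.pyRange 2 (2 + (k : Int)) 1).foldl pvStepB [0, 1]
    ∧ ((PySem.List.pyRange 2 (2 + (k : Int)) 1).foldl pvStepB [0, 1]).length = k + 2
    ∧ ((PySem.List.pyRange 2 (2 + (k : Int)) 1).foldl (pvStepA d pos) ([0, 1], [0, 1])).1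
        = pvAdjust d off ((PySem.List.pyRange 2 (2 + (k : Int)) 1).foldl pvStepB [0, 1]) := by
  induction k with
  | zero =>
      simp [PySem.List.pyRange_one_eq_nil, pvAdjust, PySem.List.enumerate_cons]
  | succ k ih =>
      obtain ⟨htemp, hlen, hres⟩ := ih
      have hsplit : PySem.List.pyRange 2 (2 + ((k + 1 : Nat) : Int)) 1
          = PySem.List.pyRange 2 (2 + (k : Int)) 1 ++ [2 + (k : Int)] := by
        have : (2 + ((k + 1 : Nat) : Int)) = (2 + (k : Int)) + 1 := by push_cast; ring
        rw [this, PySem.List.pyRange_one_succ_right (by omega)]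
      simp only [hsplit, List.foldl_append, List.foldl_cons, List.foldl_nil]
      set stA := (PySem.List.pyRange 2 (2 + (k : Int)) 1).foldl (pvStepA d pos) ([0, 1], [0, 1]) with hstA
      set fib := (PySem.List.pyRange 2 (2 + (k : Int)) 1).foldl pvStepB [0, 1] with hfib
      set y := fib.getD (k + 1) 0 + fib.getD k 0 with hy
      have hidx1 : (2 + (k : Int)) - 1 = ((k + 1 : Nat) : Int) := by push_cast; ring
      have hidx2 : (2 + (k : Int)) - 2 = ((k : Nat) : Int) := by push_cast; ring
      have hnext : pvStepB fib (2 + (k : Int)) = fib ++ [y] := by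
        have h1 : PySem.List.pyGetD fib (-1) 0 = fib[fib.length - 1] :=
          PySem.List.pyGetD_neg_ofNat fib 1 0 (by omega) (by omega)
        have h2 : PySem.List.pyGetD fib (-2) 0 = fib[fib.length - 2] :=
          PySem.List.pyGetD_neg_ofNat fib 2 0 (by omega) (by omega)
        have e1 : fib.length - 1 = k + 1 := by omega
        have e2 : fib.length - 2 = k := by omega
        have g1 : fib.getD (k + 1) 0 = fib[k + 1] := List.getD_eq_getElem _ _ (by omega)
        have g2 : fib.getD k 0 = fib[k] := List.getD_eq_getElem _ _ (by omega)
        simp only [pvStepB, h1, h2, e1, e2, hy, g1, g2]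
      have htempA : (pvStepA d pos stA (2 + (k : Int))).2 = fib ++ [y] := by
        simp only [pvStepA, htemp, hidx1, hidx2, PySem.List.pyGetD_natCast, hy]
      have hget : PySem.List.pyGetD (fib ++ [y]) (2 + (k : Int)) 0 = y := by
        have : (2 + (k : Int)) = ((fib.length : Nat) : Int) := by rw [hlen]; push_cast; ring
        rw [this, PySem.List.pyGetD_natCast]
        simp
      have hAstep : (pvStepA d pos stA (2 + (k : Int))).1
          = stA.1 ++ [if 2 + (k : Int) ≥ d ∧ pos = "start" then y + 1
              else if 2 + (k : Int) ≥ d ∧ pos = "end" then y - 1 else y] := by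
        simp only [pvStepA, htemp, hidx1, hidx2, PySem.List.pyGetD_natCast, ← hy]
        split_ifs <;> rw [hget]
      refine ⟨by rw [htempA, hnext], ?_, ?_⟩
      · rw [hnext]; simp [hlen]
      · rw [hnext, pvAdjust_append, hAstep, hres]
        congr 1
        have hcond : ((2 : Int) ≤ (fib.length : Int) ∧ d ≤ (fib.length : Int)) ↔ d ≤ 2 + (k : Int) := by
          rw [hlen]; push_cast; omega
        simp only [hcond]
        by_cases hd : d ≤ 2 + (k : Int)
        · by_cases hs : pos = "start"
          · rw [hoff]; simp [hs, hd, ge_iff_le]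
          · by_cases he : pos = "end"
            · rw [hoff]; simp [he, hd, ge_iff_le]; ring
            · rw [hoff]; simp [hs, he, hd, ge_iff_le]
        · have hd' : ¬ (2 + (k : Int) ≥ d) := by omega
          simp [hd, hd']

-- ===== VERDICT (by name: the statement is the Claim_ definition above) =====
theorem SelfDriving_MonitoringSensor_spec : Claim_equal_SelfDriving_MonitoringSensor := by
  intro distanceRange d pos _
  unfold Spec_SelfDriving_MonitoringSensor
  have ha : SelfDriving_MonitoringSensor distanceRange d pos
      = ((PySem.List.pyRange 2 distanceRange 1).foldl (pvStepA d pos) ([0, 1], [0, 1])).1 := rfl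
  have hb : SelfDriving_MonitoringSensor_alt distanceRange d pos
      = pvAdjust d (if pos = "start" then 1 else if pos = "end" then -1 else 0)
          ((PySem.List.pyRange 2 distanceRange 1).foldl pvStepB [0, 1]) := rfl
  rw [ha, hb]
  by_cases h : distanceRange ≤ 2
  · simp [PySem.List.pyRange_one_eq_nil h, pvAdjust, PySem.List.enumerate_cons]
  · have hk : distanceRange = 2 + (((distanceRange - 2).toNat : Nat) : Int) := by omega
    rw [hk]
    exact (pv_invariant d pos _ rfl (distanceRange - 2).toNat).2.2
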